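-- pv_equiv track=rewrite | github.com/olusk123/P.obiektowe166287 | lab1-A.Kubel-Slowniki.py | foo1
-- ===== SOURCE A (Python) =====
-- def foo1(a):
--     dict = {}
--     for x in a:
--         if x.isalpha():
--             if x not in dict.keys():
--                 dict.update({x: 1})
--             else:
--                 dict[x] += 1
--     return dict
-- ===== SOURCE B (Python) =====
-- def foo1(a):
--     chars = [x for x in a if x.isalpha()]
--     return {x: chars.count(x) for x in dict.fromkeys(chars)}
-- ===== Notes on version B (the rewrite author's own statement) =====
-- stated objective: alternative
-- what changed: Instead of one pass that conditionally inserts or increments a dictionary entry per character, B first filters the alphabetic characters, deduplicates them in first-occurrence order, and builds the dict in one comprehension with list.count per distinct key.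
import Mathlib
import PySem

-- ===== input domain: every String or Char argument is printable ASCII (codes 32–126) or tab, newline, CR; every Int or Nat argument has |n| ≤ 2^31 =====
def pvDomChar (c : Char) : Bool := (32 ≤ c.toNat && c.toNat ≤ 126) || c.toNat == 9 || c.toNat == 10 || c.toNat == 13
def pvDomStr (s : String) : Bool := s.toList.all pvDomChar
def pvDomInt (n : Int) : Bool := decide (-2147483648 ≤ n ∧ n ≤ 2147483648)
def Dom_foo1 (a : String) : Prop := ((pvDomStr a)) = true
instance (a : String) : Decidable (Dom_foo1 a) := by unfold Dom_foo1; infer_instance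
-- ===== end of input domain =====

-- B builds the dict by filtering, deduplicating and counting per distinct key instead of A's
-- incremental per-character insert/increment pass; same return value (alternative decomposition).

-- ===== PORT A =====
def foo1 (a : String) : List (String × Int) :=
  (a.toList.foldl (fun d x =>
    if PySem.Chars.isalpha x then
      if d.contains x.toString = false then
        d.insert x.toString 1
      else
        d.modify x.toString 0 (· + 1)
    else d) (PySem.Dict.empty : PySem.Dict String Int)).items

-- ===== PORT B =====
def foo1_alt (a : String) : List (String × Int) :=
  let chars := a.toList.filter (fun x => PySem.Chars.isalpha x)
  (PySem.List.dedup chars).map (fun x => (x.toString, (chars.count x : Int)))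

-- ===== PRECONDITION & SPEC =====
def Spec_foo1 (a : String) (out : List (String × Int)) : Prop := out = foo1_alt a
instance (a : String) (out : List (String × Int)) : Decidable (Spec_foo1 a out) := by unfold Spec_foo1; infer_instance

-- ===== CLAIM (what is proved, stated in full; the proofs are below) =====
def Claim_equal_foo1 : Prop := ∀ (a : String), Dom_foo1 a → Spec_foo1 a (foo1 a)

-- ===== LEMMAS AND PROOFS =====

theorem charToString_injective : Function.Injective Char.toString := by
  intro c d h
  have : c.toString.toList = d.toString.toList := by rw [h]
  simpa using this

theorem modify_absent_eq_insert_one (d : PySem.Dict String Int) (k : String)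
    (h : d.contains k = false) : d.modify k 0 (· + 1) = d.insert k 1 := by
  simp [PySem.Dict.modify, PySem.Dict.insert, h]
  exact PySem.Dict.getD_of_not_contains d 0 h

theorem add_map_key {α β : Type} [DecidableEq α] [DecidableEq β]
    (key : α → β) (hinj : Function.Injective key) (s : List α) (x : α) :
    PySem.Set.add (s.map key) (key x) = (PySem.Set.add s x).map key := by
  have hiff : (∃ a ∈ s, key a = key x) ↔ x ∈ s := by
    constructor
    · rintro ⟨a, ha, he⟩; rwa [← hinj he]
    · intro hx; exact ⟨x, hx, rfl⟩
  by_cases hx : x ∈ s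
  · simp [PySem.Set.add, PySem.Set.contains, hiff, hx]
  · simp [PySem.Set.add, PySem.Set.contains, hiff, hx]

theorem ofList_map_key {α β : Type} [DecidableEq α] [DecidableEq β]
    (key : α → β) (hinj : Function.Injective key) (l : List α) :
    PySem.Set.ofList (l.map key) = (PySem.List.dedup l).map key := by
  simp only [PySem.List.dedup_eq_ofList]
  have main : ∀ (l : List α) (s : List α),
      List.foldl PySem.Set.add (s.map key) (l.map key) = (List.foldl PySem.Set.add s l).map key := by
    intro l
    induction l with
    | nil => intro s; simp
    | cons x t ih =>
        intro s
        simp only [List.map_cons, List.foldl_cons, add_map_key key hinj]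
        exact ih (PySem.Set.add s x)
  have := main l []
  simpa [PySem.Set.ofList_eq_foldl] using this

-- ===== VERDICT (by name: the statement is the Claim_ definition above) =====
theorem foo1_spec : Claim_equal_foo1 := by
  intro a _
  unfold Spec_foo1 foo1 foo1_alt
  set chars := a.toList.filter (fun x => PySem.Chars.isalpha x) with hchars
  have hinj : Function.Injective Char.toString := charToString_injective
  -- the loop only acts on alphabetic characters
  rw [PySem.List.foldl_if_eq_foldl_filter]
  -- both branches of the body equal a single `modify`
  have hbody : chars.foldl (fun d x =>
      if d.contains x.toString = false then d.insert x.toString 1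
      else d.modify x.toString 0 (· + 1)) (PySem.Dict.empty : PySem.Dict String Int)
      = chars.foldl (fun d x => d.modify x.toString 0 (· + 1)) PySem.Dict.empty := by
    apply PySem.List.foldl_congr_mem
    intro d x _
    by_cases h : d.contains x.toString = false
    · rw [if_pos h, modify_absent_eq_insert_one d x.toString h]
    · rw [if_neg h]
  rw [← hchars, hbody]
  -- the modify loop over mapped keys is Counter(chars.map toString)
  have hcounter : chars.foldl (fun d x => d.modify x.toString 0 (· + 1))
      (PySem.Dict.empty : PySem.Dict String Int)
      = PySem.Dict.counter (chars.map Char.toString) := by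
    rw [PySem.Dict.counter_eq_foldl, List.foldl_map]
  rw [hcounter, PySem.Dict.items_counter, ofList_map_key Char.toString hinj, List.map_map]
  apply List.map_congr_left
  intro x _
  simp only [Function.comp_apply]
  rw [List.count_map_of_injective _ _ hinj]
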